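-- pv_equiv track=rewrite | github.com/devang-k/k8s | SiVista_BE/src/Services/NetlistService.py | extract_subckt
-- ===== SOURCE A (Python) =====
-- def extract_subckt(content):
--     words=[]
--     word_list = content.split()
--     for i in range(len(word_list) - 1):
--         current_word = word_list[i]
--         if current_word.endswith('.subckt') or current_word.endswith('.SUBCKT'):
--             words.append(word_list[i + 1])
--     return(words)
-- ===== SOURCE B (Python) =====
-- def extract_subckt(content):
--     # Single streaming pass over the characters: no intermediate word list.
--     words = []
--     token = ''
--     pending = False
--     for ch in content:
--         if ch in ' \t\n\r':
--             if token:
--                 if pending: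
--                     words.append(token)
--                 pending = token.endswith('.subckt') or token.endswith('.SUBCKT')
--                 token = ''
--         else:
--             token += ch
--     if token and pending:
--         words.append(token)
--     return words
-- ===== Notes on version B (the rewrite author's own statement) =====
-- stated objective: alternative
-- what changed: Replaces split()-then-index-loop-over-adjacent-pairs with a single streaming character scan that tokenizes on the fly, carrying a boolean flag recording whether the previously completed token was a trigger, and never materializing the word list.
import Mathlib
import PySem

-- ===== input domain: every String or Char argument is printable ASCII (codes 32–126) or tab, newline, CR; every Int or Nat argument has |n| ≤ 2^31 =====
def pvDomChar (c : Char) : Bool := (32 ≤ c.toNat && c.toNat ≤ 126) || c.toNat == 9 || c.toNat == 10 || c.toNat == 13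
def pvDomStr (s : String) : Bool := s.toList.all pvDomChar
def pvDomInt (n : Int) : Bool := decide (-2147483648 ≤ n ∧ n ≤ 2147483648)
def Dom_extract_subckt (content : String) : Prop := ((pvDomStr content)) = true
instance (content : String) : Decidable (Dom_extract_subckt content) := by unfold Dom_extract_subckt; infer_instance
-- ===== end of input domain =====

-- B replaces A's split()-then-index-loop over adjacent word pairs by a single streaming
-- character scan (on-the-fly tokenizer carrying a "previous token was a trigger" flag).


-- ===== PORT A =====
-- Python indexes word_list[i] and word_list[i+1] only at i < len-1, always in range,
-- so pyGetD with default "" is exact there.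
def extract_subckt (content : String) : List String :=
  let word_list := PySem.Str.split₀ content
  (PySem.List.pyRange 0 ((word_list.length : Int) - 1) 1).foldl
    (fun words i =>
      let current_word := PySem.List.pyGetD word_list i ""
      if PySem.Str.endswith current_word ".subckt" || PySem.Str.endswith current_word ".SUBCKT"
      then words ++ [PySem.List.pyGetD word_list (i + 1) ""]
      else words) []

-- ===== PORT B =====
-- ch in ' \t\n\r'
def pvIsWS (c : Char) : Bool := c == ' ' || c == '\t' || c == '\n' || c == '\r'

-- token.endswith('.subckt') or token.endswith('.SUBCKT'), on the List Char token B accumulates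
def pvTrig (tok : List Char) : Bool :=
  PySem.Chars.endswith tok ".subckt".toList || PySem.Chars.endswith tok ".SUBCKT".toList

-- the for-loop of B plus the final flush, state = (token, pending, words)
def pvBGo : List Char → List Char → Bool → List String → List String
  | [], tok, pending, words =>
      if !tok.isEmpty && pending then words ++ [String.ofList tok] else words
  | c :: rest, tok, pending, words =>
      if pvIsWS c then
        if !tok.isEmpty then
          pvBGo rest [] (pvTrig tok) (if pending then words ++ [String.ofList tok] else words)
        else pvBGo rest tok pending words
      else pvBGo rest (tok ++ [c]) pending words

def extract_subckt_alt (content : String) : List String :=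
  pvBGo content.toList [] false []

-- ===== PRECONDITION & SPEC =====
def Spec_extract_subckt (content : String) (out : List String) : Prop := out = extract_subckt_alt content
instance (content : String) (out : List String) : Decidable (Spec_extract_subckt content out) := by unfold Spec_extract_subckt; infer_instance

-- ===== CLAIM (what is proved, stated in full; the proofs are below) =====
def Claim_equal_extract_subckt : Prop := ∀ (content : String), Dom_extract_subckt content → Spec_extract_subckt content (extract_subckt content)

-- ===== LEMMAS AND PROOFS =====

-- the trigger test at String level (as A writes it)
def pvTrigS (w : String) : Bool :=
  PySem.Str.endswith w ".subckt" || PySem.Str.endswith w ".SUBCKT"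

-- "emit every word whose predecessor (pending at entry for the first) was a trigger"
def pvStep : Bool → List (List Char) → List String
  | _, [] => []
  | pending, w :: rest => (if pending then [String.ofList w] else []) ++ pvStep (pvTrig w) rest

def pvStepS : Bool → List String → List String
  | _, [] => []
  | pending, w :: rest => (if pending then [w] else []) ++ pvStepS (pvTrigS w) rest

-- A's fold, abstracted over the word list
def pvFoldA (ws : List String) (acc : List String) : List String :=
  (PySem.List.pyRange 0 ((ws.length : Int) - 1) 1).foldl
    (fun words i =>
      if pvTrigS (PySem.List.pyGetD ws i "") then words ++ [PySem.List.pyGetD ws (i + 1) ""]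
      else words) acc

-- on the task's domain, B's whitespace test coincides with str.split()'s
lemma pvIsWS_eq (c : Char) (h : pvDomChar c = true) :
    PySem.Chars.isspace c = pvIsWS c := by
  unfold pvDomChar at h
  unfold pvIsWS
  have hinj : ∀ d : Char, c.toNat = d.toNat → c = d := by
    intro d h'
    apply Char.ext
    unfold Char.toNat at h'
    exact UInt32.toNat_inj.mp h'
  have hc : ∀ d : Char, (c == d) = decide (c.toNat = d.toNat) := by
    intro d
    rw [decide_eq_decide.mpr ⟨hinj d, fun h' => by rw [h']⟩, Bool.beq_eq_decide_eq]
  simp only [Bool.or_eq_true, Bool.and_eq_true, decide_eq_true_eq, beq_iff_eq] at h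
  simp only [PySem.Chars.isspace, hc,
    show (' ' : Char).toNat = 32 from rfl, show ('\t' : Char).toNat = 9 from rfl,
    show ('\n' : Char).toNat = 10 from rfl, show ('\r' : Char).toNat = 13 from rfl]
  rw [Bool.eq_iff_iff]
  simp only [Bool.or_eq_true, Bool.and_eq_true, decide_eq_true_eq]
  omega

-- split₀.go appends to acc
lemma pvGo_acc (s : List Char) : ∀ cur acc,
    PySem.Chars.split₀.go s cur acc = acc.reverse ++ PySem.Chars.split₀.go s cur [] := by
  induction s with
  | nil =>
      intro cur acc
      simp only [PySem.Chars.split₀.go]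
      split <;> simp
  | cons c rest ih =>
      intro cur acc
      simp only [PySem.Chars.split₀.go]
      by_cases hsp : PySem.Chars.isspace c = true
      · simp only [hsp, if_true]
        by_cases hcur : cur.isEmpty = true
        · simp only [hcur, if_true]
          rw [ih [] acc]
        · simp only [hcur]
          rw [ih [] (cur.reverse :: acc), ih [] [cur.reverse]]
          simp
      · simp only [hsp, Bool.false_eq_true, if_false]
        rw [ih (c :: cur) acc]

-- the streaming machine computes pvStep of the remaining split
lemma pvBGo_inv (s : List Char) : ∀ tok pending words,
    (∀ c ∈ s, pvDomChar c = true) →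
    pvBGo s tok pending words
      = words ++ pvStep pending (PySem.Chars.split₀.go s tok.reverse []) := by
  induction s with
  | nil =>
      intro tok pending words _
      simp only [pvBGo, PySem.Chars.split₀.go]
      by_cases htok : tok.isEmpty = true
      · simp [List.isEmpty_iff.mp htok, pvStep]
      · have h2 : tok.reverse.isEmpty = false := by
          simp only [List.isEmpty_eq_false_iff] at *
          simpa using htok
        simp only [h2, Bool.false_eq_true, if_false, List.reverse_reverse,
          List.isEmpty_eq_false_iff.mpr (by simpa using htok), Bool.not_false, Bool.true_and]
        cases pending <;> simp [pvStep]
  | cons c rest ih =>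
      intro tok pending words hdom
      have hc := pvIsWS_eq c (hdom c (by simp))
      have hrest : ∀ c ∈ rest, pvDomChar c = true := fun d hd => hdom d (by simp [hd])
      simp only [pvBGo, PySem.Chars.split₀.go, hc]
      by_cases hws : pvIsWS c = true
      · simp only [hws, if_true]
        by_cases htok : tok.isEmpty = true
        · have : tok = [] := List.isEmpty_iff.mp htok
          subst this
          simp only [htok, Bool.not_true, Bool.false_eq_true, if_false]
          rw [ih [] pending words hrest]
          simp
        · have htok' : tok.reverse.isEmpty = false := by
            simp only [List.isEmpty_eq_false_iff] at *
            simpa using htok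
          simp only [htok', Bool.false_eq_true, if_false, htok, Bool.not_false, if_true]
          rw [ih [] (pvTrig tok) _ hrest, pvGo_acc rest [] [tok.reverse.reverse]]
          simp only [List.reverse_reverse]
          cases pending <;> simp [pvStep]
      · simp only [hws, Bool.false_eq_true, if_false]
        rw [ih (tok ++ [c]) pending words hrest]
        simp

lemma pvStep_map (ws : List String) : ∀ p,
    pvStep p (ws.map String.toList) = pvStepS p ws := by
  induction ws with
  | nil => intro p; simp [pvStep, pvStepS]
  | cons w rest ih =>
      intro p
      simp only [List.map_cons, pvStep, pvStepS, ih]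
      have h1 : String.ofList w.toList = w := by simp
      have h2 : pvTrig w.toList = pvTrigS w := by simp [pvTrig, pvTrigS]
      rw [h1, h2]

-- A's index loop is the pair recursion
lemma pvFoldA_cons (a b : String) (rest : List String) (acc : List String) :
    pvFoldA (a :: b :: rest) acc
      = pvFoldA (b :: rest) (if pvTrigS a then acc ++ [b] else acc) := by
  unfold pvFoldA
  have hlen : ((a :: b :: rest).length : Int) - 1 = ((rest.length + 1 : Nat) : Int) := by
    simp
  have hlen2 : ((b :: rest).length : Int) - 1 = ((rest.length : Nat) : Int) := by
    simp
  rw [hlen, hlen2, PySem.List.pyRange_one_cons (by positivity)]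
  simp only [List.foldl_cons]
  have h0 : PySem.List.pyGetD (a :: b :: rest) (0 : Int) "" = a := by
    simp [PySem.List.pyGetD]
  have h1 : PySem.List.pyGetD (a :: b :: rest) ((0 : Int) + 1) "" = b := by
    norm_num
    simp [PySem.List.pyGetD]
  rw [h0, h1]
  rw [PySem.List.pyRange_one, PySem.List.pyRange_one]
  have t1 : (((rest.length + 1 : Nat) : Int) - (0 + 1)).toNat = rest.length := by omega
  have t2 : (((rest.length : Nat) : Int) - 0).toNat = rest.length := by omega
  rw [t1, t2, List.foldl_map, List.foldl_map]
  apply List.foldl_ext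
  intro words k _
  have e1 : (0 : Int) + 1 + (k : Int) = ((k + 1 : Nat) : Int) := by push_cast; ring
  have e2 : (0 : Int) + (k : Int) = ((k : Nat) : Int) := by norm_num
  rw [e1, e2, PySem.List.pyGetD_natCast, PySem.List.pyGetD_natCast]
  have e3 : ((k + 1 : Nat) : Int) + 1 = ((k + 2 : Nat) : Int) := by push_cast; ring
  have e4 : ((k : Nat) : Int) + 1 = ((k + 1 : Nat) : Int) := by push_cast; ring
  rw [e3, e4, PySem.List.pyGetD_natCast, PySem.List.pyGetD_natCast]
  simp [List.getD]

lemma pvFoldA_eq (ws : List String) : ∀ acc, pvFoldA ws acc = acc ++ pvStepS false ws := by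
  induction ws with
  | nil => intro acc; simp [pvFoldA, pvStepS]
  | cons a tail ih =>
      intro acc
      cases tail with
      | nil => simp [pvFoldA, pvStepS]
      | cons b rest =>
          rw [pvFoldA_cons, ih]
          simp only [pvStepS]
          cases h : pvTrigS a <;> simp

-- ===== VERDICT (by name: the statement is the Claim_ definition above) =====
theorem extract_subckt_spec : Claim_equal_extract_subckt := by
  intro content hdom
  unfold Spec_extract_subckt
  have hA : extract_subckt content = pvFoldA (PySem.Str.split₀ content) [] := rfl
  have hDomAll : ∀ c ∈ content.toList, pvDomChar c = true := by
    have := hdom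
    unfold Dom_extract_subckt pvDomStr at this
    simpa [List.all_eq_true] using this
  have hB : extract_subckt_alt content
      = pvStep false (PySem.Chars.split₀ content.toList) := by
    unfold extract_subckt_alt PySem.Chars.split₀
    simpa using pvBGo_inv content.toList [] false [] hDomAll
  rw [hA, hB, pvFoldA_eq, ← PySem.Str.split₀_map_toList, pvStep_map]
  simp
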